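-- pv_equiv track=rewrite | github.com/m1ha5/sfox_toolkit | src/sfox_trader/lib/pair_utils.py | pair_quote
-- ===== SOURCE A (Python) =====
-- QUOTE_SUFFIXES = (
-- 	"usdc",
-- 	"usdt",
-- 	"usd",
-- 	"eur",
-- 	"gbp",
-- 	"aud",
-- 	"cad",
-- 	"jpy",
-- 	"chf",
-- 	"try",
-- 	"nzd",
-- 	"sek",
-- 	"czk",
-- 	"pln",
-- 	"hkd",
-- 	"sgd",
-- 	"inr",
-- 	"brl",
-- 	"mxn",
-- )
--
-- def pair_quote(sym: str) -> str | None: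
-- 	"""Quote currency suffix from a pair string (e.g. ethusdc -> usdc). None if unknown."""
-- 	s = (sym or "").lower().strip().replace("/", "")
-- 	if not s:
-- 		return None
-- 	for q in QUOTE_SUFFIXES:
-- 		if len(s) > len(q) and s.endswith(q):
-- 			return q
-- 	return None
-- ===== SOURCE B (Python) =====
-- _QUOTES4 = frozenset(("usdc", "usdt"))
-- _QUOTES3 = frozenset((
--     "usd", "eur", "gbp", "aud", "cad", "jpy", "chf", "try", "nzd",
--     "sek", "czk", "pln", "hkd", "sgd", "inr", "brl", "mxn",
-- ))
--
-- def pair_quote(sym: str) -> str | None: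
--     """Quote currency suffix from a pair string (e.g. ethusdc -> usdc). None if unknown."""
--     s = (sym or "").lower().strip().replace("/", "")
--     if not s:
--         return None
--     tail4 = s[-4:]
--     if len(s) > 4 and tail4 in _QUOTES4:
--         return tail4
--     tail3 = s[-3:]
--     if len(s) > 3 and tail3 in _QUOTES3:
--         return tail3
--     return None
-- ===== Notes on version B (the rewrite author's own statement) =====
-- stated objective: idiomatic
-- what changed: Replaces A's linear endswith-scan over the 19-suffix tuple by loop-free straight-line code: the length-4 and length-3 tails of the normalized string are sliced once each and looked up by membership in two frozensets, so there is no loop at all.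
import Mathlib
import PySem

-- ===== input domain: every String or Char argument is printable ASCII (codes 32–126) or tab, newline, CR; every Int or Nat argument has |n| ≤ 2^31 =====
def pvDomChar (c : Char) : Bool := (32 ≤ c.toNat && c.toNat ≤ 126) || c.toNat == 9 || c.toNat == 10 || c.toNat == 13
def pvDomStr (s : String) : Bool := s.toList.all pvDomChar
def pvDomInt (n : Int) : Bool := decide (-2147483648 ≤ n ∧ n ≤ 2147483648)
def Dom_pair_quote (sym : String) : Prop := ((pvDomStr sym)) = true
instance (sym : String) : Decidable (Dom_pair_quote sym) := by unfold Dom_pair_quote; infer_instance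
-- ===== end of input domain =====

-- B replaces A's endswith-scan over the 19-suffix tuple by loop-free straight-line code:
-- slice the length-4 and length-3 tails once and check set membership (idiomatic).

-- ===== PORT A =====
def QUOTE_SUFFIXES : List String :=
  ["usdc", "usdt", "usd", "eur", "gbp", "aud", "cad", "jpy", "chf", "try",
   "nzd", "sek", "czk", "pln", "hkd", "sgd", "inr", "brl", "mxn"]

-- the 'for q in QUOTE_SUFFIXES: if …: return q' loop
def pairQuoteLoopA (s : String) : List String → Option String
  | [] => none
  | q :: rest =>
      if PySem.Str.len s > PySem.Str.len q && PySem.Str.endswith s q then some q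
      else pairQuoteLoopA s rest

def pair_quote (sym : String) : Option String :=
  let s := PySem.Str.replace (PySem.Str.strip (PySem.Str.lower sym)) "/" ""
  if s = "" then none
  else pairQuoteLoopA s QUOTE_SUFFIXES

-- ===== PORT B =====
def pqQuotes4 : PySem.Set String := PySem.Set.ofList ["usdc", "usdt"]
def pqQuotes3 : PySem.Set String :=
  PySem.Set.ofList ["usd", "eur", "gbp", "aud", "cad", "jpy", "chf", "try",
                    "nzd", "sek", "czk", "pln", "hkd", "sgd", "inr", "brl", "mxn"]

def pair_quote_alt (sym : String) : Option String :=
  let s := PySem.Str.replace (PySem.Str.strip (PySem.Str.lower sym)) "/" ""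
  if s = "" then none
  else
    let tail4 := PySem.Str.slice s (some (-4)) none
    if PySem.Str.len s > 4 ∧ tail4 ∈ pqQuotes4 then some tail4
    else
      let tail3 := PySem.Str.slice s (some (-3)) none
      if PySem.Str.len s > 3 ∧ tail3 ∈ pqQuotes3 then some tail3
      else none

-- ===== PRECONDITION & SPEC =====
def Spec_pair_quote (sym : String) (out : Option String) : Prop := out = pair_quote_alt sym
instance (sym : String) (out : Option String) : Decidable (Spec_pair_quote sym out) := by unfold Spec_pair_quote; infer_instance

-- ===== CLAIM (what is proved, stated in full; the proofs are below) =====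
def Claim_equal_pair_quote : Prop := ∀ (sym : String), Dom_pair_quote sym → Spec_pair_quote sym (pair_quote sym)

-- ===== LEMMAS AND PROOFS =====

-- the length-L tail of s, as a string
def pqTail (s : String) (L : Nat) : String := String.ofList (s.toList.drop (s.toList.length - L))

-- endswith for a suffix is equality of the same-length tail
theorem endswith_drop (s q : String) :
    PySem.Str.endswith s q = true ↔ s.toList.drop (s.toList.length - q.toList.length) = q.toList := by
  rw [PySem.Str.endswith_eq, PySem.Chars.endswith_iff, List.suffix_iff_eq_drop]
  exact eq_comm

-- over a segment whose suffixes all have length L, A's loop returns the length-L tail iff it is in the segment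
theorem loopA_const_len (s : String) (L : Nat) (cs : List String)
    (hlen : ∀ q ∈ cs, q.toList.length = L) :
    pairQuoteLoopA s cs =
      if L < s.toList.length ∧ pqTail s L ∈ cs then some (pqTail s L) else none := by
  induction cs with
  | nil => simp [pairQuoteLoopA]
  | cons q rest ih =>
      have hq : q.toList.length = L := hlen q (by simp)
      have ih' := ih (fun p hp => hlen p (by simp [hp]))
      by_cases hL : L < s.toList.length
      · by_cases heq : pqTail s L = q
        · have hend : PySem.Str.endswith s q = true := by
            rw [endswith_drop s q, hq, ← String.toList_ofList (l := s.toList.drop (s.toList.length - L))]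
            exact congrArg String.toList heq
          have hcond : (PySem.Str.len s > PySem.Str.len q && PySem.Str.endswith s q) = true := by
            simp only [PySem.Str.len_eq, hq, hend, Bool.and_true, decide_eq_true_eq]
            omega
          rw [pairQuoteLoopA, if_pos hcond, if_pos ⟨hL, by simp [heq]⟩, heq]
        · have hend : PySem.Str.endswith s q = false := by
            rw [Bool.eq_false_iff, Ne, endswith_drop s q, hq]
            intro hc
            exact heq (String.toList_inj.mp (by simpa [pqTail] using hc))
          rw [pairQuoteLoopA, if_neg (by simp only [hend, Bool.and_false]; exact Bool.false_ne_true), ih']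
          by_cases hmem : pqTail s L ∈ rest
          · rw [if_pos ⟨hL, hmem⟩, if_pos ⟨hL, by simp [hmem]⟩]
          · rw [if_neg (by tauto), if_neg (by simp [List.mem_cons]; tauto)]
      · have hcond : ¬ ((PySem.Str.len s > PySem.Str.len q && PySem.Str.endswith s q) = true) := by
          simp only [PySem.Str.len_eq, hq, Bool.and_eq_true, decide_eq_true_eq, not_and]
          omega
        rw [pairQuoteLoopA, if_neg hcond, ih', if_neg (by tauto), if_neg (by tauto)]

-- A's loop distributes over append (early return = orElse)
theorem loopA_append (s : String) (cs ds : List String) :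
    pairQuoteLoopA s (cs ++ ds) = (pairQuoteLoopA s cs).orElse (fun _ => pairQuoteLoopA s ds) := by
  induction cs with
  | nil => simp [pairQuoteLoopA]
  | cons q rest ih =>
      simp only [List.cons_append, pairQuoteLoopA]
      split <;> simp [ih]

-- the negative slice s[-L:] is the length-L tail
theorem slice_neg_tail (s : String) (L : Nat) (hL : 0 < L) :
    PySem.Str.slice s (some (-(L : Int))) none = pqTail s L := by
  rw [← String.ofList_toList (s := PySem.Str.slice s (some (-(L : Int))) none)]
  rw [PySem.Str.toList_slice, PySem.Chars.slice_eq_listSlice, PySem.List.slice_from_neg_natCast _ L hL]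
  rfl

-- A's loop over the full suffix list equals B's straight-line body
theorem loop_eq_alt (s : String) :
    pairQuoteLoopA s QUOTE_SUFFIXES =
      (let tail4 := PySem.Str.slice s (some (-4)) none
       if PySem.Str.len s > 4 ∧ tail4 ∈ pqQuotes4 then some tail4
       else
         let tail3 := PySem.Str.slice s (some (-3)) none
         if PySem.Str.len s > 3 ∧ tail3 ∈ pqQuotes3 then some tail3
         else none) := by
  have h4 := loopA_const_len s 4 ["usdc", "usdt"] (by decide)
  have h3 := loopA_const_len s 3 ["usd", "eur", "gbp", "aud", "cad", "jpy", "chf", "try",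
    "nzd", "sek", "czk", "pln", "hkd", "sgd", "inr", "brl", "mxn"] (by decide)
  have hsplit : QUOTE_SUFFIXES = ["usdc", "usdt"] ++ ["usd", "eur", "gbp", "aud", "cad", "jpy",
    "chf", "try", "nzd", "sek", "czk", "pln", "hkd", "sgd", "inr", "brl", "mxn"] := rfl
  have ht4 : PySem.Str.slice s (some (-4)) none = pqTail s 4 := slice_neg_tail s 4 (by norm_num)
  have ht3 : PySem.Str.slice s (some (-3)) none = pqTail s 3 := slice_neg_tail s 3 (by norm_num)
  have e4 : ((s.toList.length : Int) > 4) ↔ 4 < s.toList.length := by exact_mod_cast Iff.rfl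
  have e3 : ((s.toList.length : Int) > 3) ↔ 3 < s.toList.length := by exact_mod_cast Iff.rfl
  rw [hsplit, loopA_append, h4, h3]
  simp only [ht4, ht3, PySem.Str.len_eq, pqQuotes4, pqQuotes3, PySem.Set.mem_ofList, e4, e3]
  split_ifs <;> rfl


-- ===== VERDICT (by name: the statement is the Claim_ definition above) =====
theorem pair_quote_spec : Claim_equal_pair_quote := by
  intro sym _
  unfold Spec_pair_quote pair_quote pair_quote_alt
  simp only []
  split
  · rfl
  · exact loop_eq_alt _
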